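-- pv_equiv track=rewrite | github.com/KevinEduardo/AskPassGen | AskPassGen.py | semelnome
-- ===== SOURCE A (Python) =====
-- import collections
--
-- semels = collections.OrderedDict([('i', '1'), ('s', '$'), ('n', 'm'), ('o', '0'), ('c', 'k'), ('w', 'u'), ('v','w')])
--
-- nsem = {i:k for i,k in enumerate(semels.keys())}
--
-- lsem = {k:i for i,k in enumerate(semels.keys())}
--
-- def semelnome(nome,letrosa,modo):
-- 	nome = nome.lower()
-- 	letra = letrosa
-- 	nomenovo = nome
-- 	if (modo == 1):
-- 		nomenovo = nomenovo.replace(nsem[lsem[letra]],semels[nsem[lsem[letra]]])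
-- 	else:
-- 		for num in nsem:
-- 			nomenovo = nomenovo.replace(nsem[num],semels[nsem[num]])
-- 	nomenovo = nomenovo[0].upper() + nomenovo[1:len(nomenovo)]
-- 	return nomenovo
-- ===== SOURCE B (Python) =====
-- _SEMELS = {'i': '1', 's': '$', 'n': 'm', 'o': '0', 'c': 'k', 'w': 'u', 'v': 'w'}
--
-- def semelnome(nome, letrosa, modo):
--     nome = nome.lower()
--     if modo == 1:
--         sub = _SEMELS[letrosa]
--         novo = ''.join(sub if ch == letrosa else ch for ch in nome)
--     else:
--         novo = ''.join(_SEMELS.get(ch, ch) for ch in nome)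
--     return novo[0].upper() + novo[1:]
-- ===== Notes on version B (the rewrite author's own statement) =====
-- stated objective: idiomatic
-- what changed: Replaces A's dict-index round-trips and seven sequential full-string .replace scans with one character-by-character pass using a single substitution table (a join over a generator).
import Mathlib
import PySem

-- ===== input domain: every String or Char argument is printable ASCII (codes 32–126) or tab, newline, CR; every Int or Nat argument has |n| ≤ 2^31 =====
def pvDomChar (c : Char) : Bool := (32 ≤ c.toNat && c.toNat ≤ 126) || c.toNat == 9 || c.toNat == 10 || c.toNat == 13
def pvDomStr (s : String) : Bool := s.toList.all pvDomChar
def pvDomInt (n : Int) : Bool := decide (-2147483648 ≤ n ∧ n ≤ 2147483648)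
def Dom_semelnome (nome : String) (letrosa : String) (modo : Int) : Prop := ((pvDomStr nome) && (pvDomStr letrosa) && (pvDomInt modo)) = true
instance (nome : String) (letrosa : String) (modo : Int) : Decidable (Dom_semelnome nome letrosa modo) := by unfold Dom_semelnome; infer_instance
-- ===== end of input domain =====

-- B replaces A's dict-index round-trips and seven sequential full-string replace scans with one
-- character-by-character substitution pass over the lowered name (idiomatic single traversal).


-- ===== PORT A =====
-- module-level dicts of Source A
def semels : PySem.Dict String String :=
  PySem.Dict.ofList [("i", "1"), ("s", "$"), ("n", "m"), ("o", "0"), ("c", "k"), ("w", "u"), ("v", "w")]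
def nsem : PySem.Dict Int String :=
  PySem.Dict.ofList [(0, "i"), (1, "s"), (2, "n"), (3, "o"), (4, "c"), (5, "w"), (6, "v")]
def lsem : PySem.Dict String Int :=
  PySem.Dict.ofList [("i", 0), ("s", 1), ("n", 2), ("o", 3), ("c", 4), ("w", 5), ("v", 6)]

-- nomenovo[0].upper() + nomenovo[1:len(nomenovo)]  (none = IndexError on the empty string; Pre_ excludes it)
def capFirst (r : String) : String :=
  match PySem.Str.pyGet? r 0 with
  | none => ""
  | some c => String.mk (PySem.Chars.upperChar c :: (PySem.Str.slice r (some 1) (some (PySem.Str.len r))).toList)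

def semelnome (nome : String) (letrosa : String) (modo : Int) : String :=
  let nome' := PySem.Str.lower nome
  let nomenovo := nome'
  let nomenovo :=
    if modo == 1 then
      -- nomenovo.replace(nsem[lsem[letra]], semels[nsem[lsem[letra]]]); none = KeyError, Pre_ excludes it
      match lsem.get? letrosa with
      | none => nomenovo
      | some idx =>
        match nsem.get? idx with
        | none => nomenovo
        | some k =>
          match semels.get? k with
          | none => nomenovo
          | some v => PySem.Str.replace nomenovo k v
    else
      -- for num in nsem: nomenovo = nomenovo.replace(nsem[num], semels[nsem[num]])
      nsem.keys.foldl (fun acc num =>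
        PySem.Str.replace acc (nsem.getD num "") (semels.getD (nsem.getD num "") "")) nomenovo
  capFirst nomenovo

-- ===== PORT B =====
-- the substitution table _SEMELS of Source B, as the per-character lookup with default (_SEMELS.get(ch, ch))
def bsub (c : Char) : Char :=
  if c == 'i' then '1' else if c == 's' then '$' else if c == 'n' then 'm'
  else if c == 'o' then '0' else if c == 'c' then 'k' else if c == 'w' then 'u'
  else if c == 'v' then 'w' else c

-- novo[0].upper() + novo[1:], on the built character list ([] = IndexError; Pre_ excludes it)
def capList (novo : List Char) : String :=
  match novo with
  | [] => ""
  | c :: t => String.mk (PySem.Chars.upperChar c :: t)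

def semelnome_alt (nome : String) (letrosa : String) (modo : Int) : String :=
  let low := PySem.Chars.lower nome.toList
  let novo :=
    if modo == 1 then
      -- sub = _SEMELS[letrosa]; ''.join(sub if ch == letrosa else ch for ch in nome)
      -- (a letrosa that is not a single key raises KeyError in Python; Pre_ excludes it)
      match letrosa.toList with
      | [l] => low.map (fun c => if c == l then bsub l else c)
      | _ => low
    else low.map bsub
  capList novo

-- ===== PRECONDITION & SPEC =====
-- Pre_ excludes exactly the inputs where A raises: the empty name (IndexError on nomenovo[0])
-- and, for modo == 1, a letrosa that is not one of the seven substitutable letters (KeyError).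
def Pre_semelnome (nome : String) (letrosa : String) (modo : Int) : Prop :=
  nome ≠ "" ∧ (modo = 1 → letrosa ∈ ["i", "s", "n", "o", "c", "w", "v"])
instance (nome : String) (letrosa : String) (modo : Int) : Decidable (Pre_semelnome nome letrosa modo) := by unfold Pre_semelnome; infer_instance

def pvWitness_semelnome : String × String × Int := ("Vincenzo", "o", 1)

def Spec_semelnome (nome : String) (letrosa : String) (modo : Int) (out : String) : Prop := out = semelnome_alt nome letrosa modo
instance (nome : String) (letrosa : String) (modo : Int) (out : String) : Decidable (Spec_semelnome nome letrosa modo out) := by unfold Spec_semelnome; infer_instance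

-- ===== CLAIM (what is proved, stated in full; the proofs are below) =====
def Claim_equal_semelnome : Prop := ∀ (nome : String) (letrosa : String) (modo : Int), Dom_semelnome nome letrosa modo → Pre_semelnome nome letrosa modo → Spec_semelnome nome letrosa modo (semelnome nome letrosa modo)

-- ===== LEMMAS AND PROOFS =====

-- str.replace with a single-character pattern and replacement is a character map
theorem go_single (a b : Char) : ∀ (l acc : List Char),
    PySem.Chars.replace.go [a] [b] l.length l acc
      = acc.reverse ++ l.map (fun c => if c == a then b else c) := by
  intro l
  induction l with
  | nil => intro acc; simp [PySem.Chars.replace.go]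
  | cons c t ih =>
    intro acc
    rw [List.length_cons, PySem.Chars.replace.go]
    by_cases h : c = a
    · subst h
      simp [List.isPrefixOf, ih]
    · have : [a].isPrefixOf (c :: t) = false := by
        simp [List.isPrefixOf]; exact fun hh => absurd hh.symm h
      simp [this, h, ih]

theorem replace_single (a b : Char) (l : List Char) :
    PySem.Chars.replace l [a] [b] = l.map (fun c => if c == a then b else c) := by
  rw [PySem.Chars.replace]
  simp [go_single]

-- A's seven sequential substitutions compose to B's single table lookup
set_option maxHeartbeats 1000000 in
theorem seven_replaces (cs : List Char) :
    PySem.Chars.replace (PySem.Chars.replace (PySem.Chars.replace (PySem.Chars.replace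
      (PySem.Chars.replace (PySem.Chars.replace (PySem.Chars.replace cs
        ['i'] ['1']) ['s'] ['$']) ['n'] ['m']) ['o'] ['0']) ['c'] ['k']) ['w'] ['u']) ['v'] ['w']
      = cs.map bsub := by
  simp only [replace_single, List.map_map]
  refine List.map_congr_left (fun x _ => ?_)
  simp only [Function.comp_apply]
  by_cases h1 : x = 'i'; · subst h1; rfl
  by_cases h2 : x = 's'; · subst h2; rfl
  by_cases h3 : x = 'n'; · subst h3; rfl
  by_cases h4 : x = 'o'; · subst h4; rfl
  by_cases h5 : x = 'c'; · subst h5; rfl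
  by_cases h6 : x = 'w'; · subst h6; rfl
  by_cases h7 : x = 'v'; · subst h7; rfl
  simp [bsub, h1, h2, h3, h4, h5, h6, h7]

-- A's capitalisation step on a string known to be nonempty
theorem capFirst_eq (r : String) (c : Char) (t : List Char) (h : r.toList = c :: t) :
    capFirst r = String.mk (PySem.Chars.upperChar c :: t) := by
  have hg : PySem.Str.pyGet? r 0 = some c := by simp [h]
  have hlen : PySem.Str.len r = ((c :: t).length : Int) := by simp [PySem.Str.len_eq, h]
  have hs : (PySem.Str.slice r (some 1) (some (PySem.Str.len r))).toList = t := by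
    rw [PySem.Str.toList_slice, PySem.Chars.slice_eq_listSlice, hlen,
      PySem.List.slice_toNat _ (by omega) (by positivity)]
    simp [h]
  rw [capFirst, hg, hs]

-- one single-character replace followed by the capitalisation, as a character map
theorem repl_cap (s : String) (a b : Char) (o n : String) (ho : o.toList = [a])
    (hn : n.toList = [b]) (c : Char) (t : List Char) (hs : s.toList = c :: t) :
    capFirst (PySem.Str.replace s o n)
      = String.mk (PySem.Chars.upperChar (if c == a then b else c)
          :: t.map (fun x => if x == a then b else x)) := by
  apply capFirst_eq
  rw [PySem.Str.toList_replace, ho, hn, replace_single, hs]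
  simp

theorem toList_ne_nil (s : String) (h : s ≠ "") : s.toList ≠ [] := by
  simp [String.toList_eq_nil_iff]; exact h

-- ===== VERDICT =====
set_option maxHeartbeats 1000000 in
theorem semelnome_spec : Claim_equal_semelnome := by
  intro nome letrosa modo _ hpre
  obtain ⟨hne, hm⟩ := hpre
  unfold Spec_semelnome semelnome semelnome_alt
  have hln : (PySem.Str.lower nome).toList = PySem.Chars.lower nome.toList := by
    simp [PySem.Str.toList_lower]
  cases hL : PySem.Chars.lower nome.toList with
  | nil =>
    exact absurd (by simpa [PySem.Chars.lower] using hL) (toList_ne_nil nome hne)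
  | cons c t =>
    by_cases hmodo : modo = 1
    · subst hmodo
      have hmem := hm rfl
      simp only [List.mem_cons, List.not_mem_nil, or_false] at hmem
      rcases hmem with rfl | rfl | rfl | rfl | rfl | rfl | rfl
      · -- letrosa = "i"
        show capFirst (PySem.Str.replace (PySem.Str.lower nome) "i" "1")
            = capList ((c :: t).map (fun x => if x == 'i' then bsub 'i' else x))
        rw [
          repl_cap (PySem.Str.lower nome) 'i' (bsub 'i') "i" "1" rfl rfl c t (by rw [hln, hL])]
        rfl
      · -- letrosa = "s"
        show capFirst (PySem.Str.replace (PySem.Str.lower nome) "s" "$")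
            = capList ((c :: t).map (fun x => if x == 's' then bsub 's' else x))
        rw [
          repl_cap (PySem.Str.lower nome) 's' (bsub 's') "s" "$" rfl rfl c t (by rw [hln, hL])]
        rfl
      · -- letrosa = "n"
        show capFirst (PySem.Str.replace (PySem.Str.lower nome) "n" "m")
            = capList ((c :: t).map (fun x => if x == 'n' then bsub 'n' else x))
        rw [
          repl_cap (PySem.Str.lower nome) 'n' (bsub 'n') "n" "m" rfl rfl c t (by rw [hln, hL])]
        rfl
      · -- letrosa = "o"
        show capFirst (PySem.Str.replace (PySem.Str.lower nome) "o" "0")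
            = capList ((c :: t).map (fun x => if x == 'o' then bsub 'o' else x))
        rw [
          repl_cap (PySem.Str.lower nome) 'o' (bsub 'o') "o" "0" rfl rfl c t (by rw [hln, hL])]
        rfl
      · -- letrosa = "c"
        show capFirst (PySem.Str.replace (PySem.Str.lower nome) "c" "k")
            = capList ((c :: t).map (fun x => if x == 'c' then bsub 'c' else x))
        rw [
          repl_cap (PySem.Str.lower nome) 'c' (bsub 'c') "c" "k" rfl rfl c t (by rw [hln, hL])]
        rfl
      · -- letrosa = "w"
        show capFirst (PySem.Str.replace (PySem.Str.lower nome) "w" "u")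
            = capList ((c :: t).map (fun x => if x == 'w' then bsub 'w' else x))
        rw [
          repl_cap (PySem.Str.lower nome) 'w' (bsub 'w') "w" "u" rfl rfl c t (by rw [hln, hL])]
        rfl
      · -- letrosa = "v"
        show capFirst (PySem.Str.replace (PySem.Str.lower nome) "v" "w")
            = capList ((c :: t).map (fun x => if x == 'v' then bsub 'v' else x))
        rw [
          repl_cap (PySem.Str.lower nome) 'v' (bsub 'v') "v" "w" rfl rfl c t (by rw [hln, hL])]
        rfl
    · have hb : (modo == 1) = false := by simp [hmodo]
      simp only [hb, Bool.false_eq_true, if_false]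
      show capFirst (nsem.keys.foldl (fun acc num =>
          PySem.Str.replace acc (nsem.getD num "") (semels.getD (nsem.getD num "") ""))
          (PySem.Str.lower nome))
        = capList ((c :: t).map bsub)
      have hA : capFirst (nsem.keys.foldl (fun acc num =>
          PySem.Str.replace acc (nsem.getD num "") (semels.getD (nsem.getD num "") ""))
          (PySem.Str.lower nome))
          = String.mk (PySem.Chars.upperChar (bsub c) :: t.map bsub) := by
        apply capFirst_eq
        show (PySem.Str.replace (PySem.Str.replace (PySem.Str.replace (PySem.Str.replace
          (PySem.Str.replace (PySem.Str.replace (PySem.Str.replace (PySem.Str.lower nome)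
          "i" "1") "s" "$") "n" "m") "o" "0") "c" "k") "w" "u") "v" "w").toList = _
        simp only [PySem.Str.toList_replace, PySem.Str.toList_lower]
        rw [show ("i":String).toList = ['i'] from rfl, show ("1":String).toList = ['1'] from rfl,
          show ("s":String).toList = ['s'] from rfl, show ("$":String).toList = ['$'] from rfl,
          show ("n":String).toList = ['n'] from rfl, show ("m":String).toList = ['m'] from rfl,
          show ("o":String).toList = ['o'] from rfl, show ("0":String).toList = ['0'] from rfl,
          show ("c":String).toList = ['c'] from rfl, show ("k":String).toList = ['k'] from rfl,
          show ("u":String).toList = ['u'] from rfl,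
          show ("v":String).toList = ['v'] from rfl, show ("w":String).toList = ['w'] from rfl,
          seven_replaces, hL, List.map_cons]
      rw [hA]
      rfl
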